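-- pv_equiv track=rewrite | github.com/AndriciucAndreeaCristina/LFA | nfa-regex/main.py | paranthesis
-- ===== SOURCE A (Python) =====
-- def paranthesis(expr):
--     aux = 0
--     for i in range(len(expr)):
--         if expr[i] == '(':
--             aux += 1
--         elif expr[i] == ')':
--             aux -= 1
--         elif expr[i] == '|' and aux == 0:
--             return '(' + expr + ')'
--     return expr
-- ===== SOURCE B (Python) =====
-- def paranthesis(expr):
--     # Jump from one '|' occurrence to the next with str.find; a '|' is top-level
--     # iff its prefix has equally many '(' and ')', tested with str.count.
--     i = expr.find('|')
--     while i != -1: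
--         if expr.count('(', 0, i) == expr.count(')', 0, i):
--             return '(' + expr + ')'
--         i = expr.find('|', i + 1)
--     return expr
-- ===== Notes on version B (the rewrite author's own statement) =====
-- stated objective: faster
-- what changed: Instead of a per-character depth-counter loop, B iterates only over the '|' occurrences via str.find and tests each by comparing '(' and ')' counts of its prefix with str.count.
import Mathlib
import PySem

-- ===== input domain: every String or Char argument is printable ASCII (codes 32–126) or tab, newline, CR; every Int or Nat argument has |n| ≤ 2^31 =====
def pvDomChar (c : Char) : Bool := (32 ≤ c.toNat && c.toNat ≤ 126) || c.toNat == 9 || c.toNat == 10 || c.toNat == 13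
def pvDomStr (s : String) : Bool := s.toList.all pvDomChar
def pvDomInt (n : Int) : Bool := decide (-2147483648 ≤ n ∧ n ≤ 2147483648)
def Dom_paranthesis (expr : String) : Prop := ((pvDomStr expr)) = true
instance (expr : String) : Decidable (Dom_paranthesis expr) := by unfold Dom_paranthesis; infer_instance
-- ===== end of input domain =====

-- B replaces A's per-character depth-counter loop by jumping between '|' occurrences
-- (str.find) and testing each by comparing '(' and ')' counts of its prefix (str.count);
-- alternative decomposition, same value.

-- ===== PORT A =====
-- A's loop over indices with running counter aux and early return, as structural recursion.
def paranthesisLoop (expr : String) : List Char → Int → String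
  | [], _ => expr
  | c :: cs, aux =>
    if c = '(' then paranthesisLoop expr cs (aux + 1)
    else if c = ')' then paranthesisLoop expr cs (aux - 1)
    else if c = '|' ∧ aux = 0 then "(" ++ expr ++ ")"
    else paranthesisLoop expr cs aux

def paranthesis (expr : String) : String :=
  paranthesisLoop expr expr.toList 0

-- ===== PORT B =====
-- expr.find('|', i): first index ≥ i holding '|' (Python's -1 becomes none)
def pvFind (cs : List Char) (i : Nat) : Option Nat :=
  ((cs.drop i).findIdx? (· = '|')).map (· + i)

-- bounds of a successful find (cited by altLoop's decreasing_by)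
theorem pvFind_bounds (cs : List Char) (i j : Nat) (h : pvFind cs i = some j) :
    i ≤ j ∧ j < cs.length := by
  unfold pvFind at h
  rcases Option.map_eq_some_iff.mp h with ⟨k, hk, rfl⟩
  have := (List.findIdx?_eq_some_iff_getElem.mp hk).fst
  simp [List.length_drop] at this
  omega

-- B's while loop: jump to the next '|', test prefix counts, else continue after it
def altLoop (orig : String) (cs : List Char) (i : Nat) : String :=
  match h : pvFind cs i with
  | none => orig
  | some j =>
    if (cs.take j).count '(' = (cs.take j).count ')' then "(" ++ orig ++ ")"
    else altLoop orig cs (j + 1)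
termination_by cs.length - i
decreasing_by
  have := pvFind_bounds cs i j h
  omega

def paranthesis_alt (expr : String) : String :=
  altLoop expr expr.toList 0

-- ===== PRECONDITION & SPEC =====
def Spec_paranthesis (expr : String) (out : String) : Prop := out = paranthesis_alt expr
instance (expr : String) (out : String) : Decidable (Spec_paranthesis expr out) := by unfold Spec_paranthesis; infer_instance

-- ===== CLAIM (what is proved, stated in full; the proofs are below) =====
def Claim_equal_paranthesis : Prop := ∀ (expr : String), Dom_paranthesis expr → Spec_paranthesis expr (paranthesis expr)

-- ===== LEMMAS AND PROOFS =====
-- "some '|' at index j whose prefix has paren balance aux" (A's wrap condition, generalized)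
def topBarAux (cs : List Char) (aux : Int) : Bool :=
  (List.range cs.length).any (fun j =>
    decide (cs[j]? = some '|') &&
    decide ((((cs.take j).count ')' : Int) - ((cs.take j).count '(' : Int)) = aux))

-- "some '|' at index j ≥ i whose prefix has equal paren counts" (B's wrap condition)
def topBarFrom (cs : List Char) (i : Nat) : Bool :=
  (List.range cs.length).any (fun j =>
    decide (i ≤ j) && decide (cs[j]? = some '|') &&
    decide ((cs.take j).count '(' = (cs.take j).count ')'))

theorem topBarAux_cons (c : Char) (cs : List Char) (aux : Int) :
    topBarAux (c :: cs) aux =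
      (((decide (c = '|')) && decide (aux = 0)) ||
        topBarAux cs (aux - (if c = ')' then 1 else if c = '(' then -1 else 0))) := by
  rw [Bool.eq_iff_iff]
  simp only [topBarAux, List.any_eq_true, List.mem_range, Bool.and_eq_true, decide_eq_true_eq,
    Bool.or_eq_true, List.length_cons]
  constructor
  · rintro ⟨j, hj, hbar, hcnt⟩
    cases j with
    | zero =>
      left
      simp only [List.getElem?_cons_zero, Option.some.injEq] at hbar
      simp only [List.take_zero, List.count_nil, Nat.cast_zero, sub_zero] at hcnt
      exact ⟨hbar, by omega⟩
    | succ j =>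
      right
      refine ⟨j, by omega, by simpa using hbar, ?_⟩
      rw [List.take_succ_cons] at hcnt
      simp only [List.count_cons, beq_iff_eq] at hcnt
      split_ifs at hcnt ⊢ <;> first | omega | simp_all
  · rintro (⟨hbar, haux⟩ | ⟨j, hj, hbar, hcnt⟩)
    · exact ⟨0, by omega, by simpa using hbar, by simp [haux]⟩
    · refine ⟨j + 1, by omega, by simpa using hbar, ?_⟩
      rw [List.take_succ_cons]
      simp only [List.count_cons, beq_iff_eq]
      split_ifs at hcnt ⊢ <;> first | omega | simp_all

theorem paranthesisLoop_eq (expr : String) (cs : List Char) (aux : Int) :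
    paranthesisLoop expr cs aux =
      (if topBarAux cs aux then "(" ++ expr ++ ")" else expr) := by
  induction cs generalizing aux with
  | nil => simp [paranthesisLoop, topBarAux]
  | cons c cs ih =>
    rw [topBarAux_cons]
    by_cases h1 : c = '('
    · simp [paranthesisLoop, h1, ih, show ¬('(' = '|') by decide, sub_neg_eq_add]
    · by_cases h2 : c = ')'
      · simp [paranthesisLoop, h2, ih, show ¬(')' = '|') by decide, sub_eq_add_neg]
      · by_cases h3 : c = '|' ∧ aux = 0
        · simp [paranthesisLoop, h3.1, h3.2]
        · by_cases hb : c = '|'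
          · have haux : ¬ aux = 0 := fun h => h3 ⟨hb, h⟩
            simp [paranthesisLoop, hb, haux, ih]
          · simp [paranthesisLoop, h1, h2, hb, ih]

-- facts about pvFind
theorem pvFind_none (cs : List Char) (i : Nat) (h : pvFind cs i = none) :
    ∀ j, i ≤ j → cs[j]? ≠ some '|' := by
  unfold pvFind at h
  have hnone := List.findIdx?_eq_none_iff.mp (Option.map_eq_none_iff.mp h)
  intro j hij hbar
  obtain ⟨hjl, hget⟩ := List.getElem?_eq_some_iff.mp hbar
  have hmem : cs[j] ∈ cs.drop i := by
    have hh : (cs.drop i)[j - i]'(by simp [List.length_drop]; omega) = cs[j] := by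
      rw [List.getElem_drop]; congr 1; omega
    exact hh ▸ List.getElem_mem _
  have := hnone _ hmem
  simp only [decide_eq_false_iff_not] at this
  exact this hget

theorem pvFind_some (cs : List Char) (i j : Nat) (h : pvFind cs i = some j) :
    cs[j]? = some '|' ∧ ∀ m, i ≤ m → m < j → cs[m]? ≠ some '|' := by
  unfold pvFind at h
  rcases Option.map_eq_some_iff.mp h with ⟨k, hk, rfl⟩
  obtain ⟨hkl, hbar, hmin⟩ := List.findIdx?_eq_some_iff_getElem.mp hk
  have hlen : k + i < cs.length := by simp [List.length_drop] at hkl; omega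
  have hdk : (cs.drop i)[k]'hkl = cs[k + i] := by
    rw [List.getElem_drop]; congr 1; omega
  constructor
  · rw [List.getElem?_eq_getElem hlen]
    simp only [decide_eq_true_eq] at hbar
    rw [hdk] at hbar
    simpa using hbar
  · intro m him hmk hbar
    have hml : m < cs.length := by omega
    have hlt := hmin (m - i) (by omega)
    have hg : (cs.drop i)[m - i]'(by simp [List.length_drop]; omega) = cs[m] := by
      rw [List.getElem_drop]; congr 1; omega
    simp only [hg, decide_eq_true_eq] at hlt
    rw [List.getElem?_eq_getElem hml] at hbar
    exact hlt (by simpa using hbar)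

theorem topBarFrom_of_find_none (cs : List Char) (i : Nat) (h : pvFind cs i = none) :
    topBarFrom cs i = false := by
  rw [Bool.eq_false_iff]
  intro ht
  simp only [topBarFrom, List.any_eq_true, List.mem_range, Bool.and_eq_true,
    decide_eq_true_eq] at ht
  obtain ⟨j, hj, ⟨⟨hij, hbar⟩, hcnt⟩⟩ := ht
  exact pvFind_none cs i h j hij hbar

theorem altLoop_eq (orig : String) (cs : List Char) :
    ∀ n i, cs.length - i ≤ n →
      altLoop orig cs i = (if topBarFrom cs i then "(" ++ orig ++ ")" else orig) := by
  intro n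
  induction n with
  | zero =>
    intro i hi
    have hfind : pvFind cs i = none := by
      cases h : pvFind cs i with
      | none => rfl
      | some j => have := pvFind_bounds cs i j h; omega
    rw [altLoop, hfind, topBarFrom_of_find_none cs i hfind]
    simp
  | succ n ih =>
    intro i hi
    rw [altLoop]
    cases hfind : pvFind cs i with
    | none =>
      rw [topBarFrom_of_find_none cs i hfind]
      simp
    | some j =>
      obtain ⟨hij, hjl⟩ := pvFind_bounds cs i j hfind
      obtain ⟨hbar, hmin⟩ := pvFind_some cs i j hfind
      by_cases hcnt : (cs.take j).count '(' = (cs.take j).count ')'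
      · have ht : topBarFrom cs i = true := by
          simp only [topBarFrom, List.any_eq_true]
          refine ⟨j, ?_, ?_⟩
          · simp only [List.mem_range]; omega
          · simp [hij, hbar, hcnt]
        simp [hcnt, ht]
      · have hstep : topBarFrom cs i = topBarFrom cs (j + 1) := by
          rw [Bool.eq_iff_iff]
          simp only [topBarFrom, List.any_eq_true, List.mem_range, Bool.and_eq_true,
            decide_eq_true_eq]
          constructor
          · rintro ⟨j', hj', ⟨⟨hij', hbar'⟩, hcnt'⟩⟩
            refine ⟨j', hj', ⟨⟨?_, hbar'⟩, hcnt'⟩⟩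
            rcases Nat.lt_or_ge j' j with hlt | hge
            · exact absurd hbar' (hmin j' hij' hlt)
            · rcases Nat.eq_or_lt_of_le hge with rfl | hh
              · exact absurd hcnt' hcnt
              · omega
          · rintro ⟨j', hj', ⟨⟨hij', hbar'⟩, hcnt'⟩⟩
            exact ⟨j', hj', ⟨⟨by omega, hbar'⟩, hcnt'⟩⟩
        rw [hstep]
        simp only [hcnt, if_false]
        exact ih (j + 1) (by omega)

theorem topBar_zero (cs : List Char) : topBarFrom cs 0 = topBarAux cs 0 := by
  rw [Bool.eq_iff_iff]
  simp only [topBarFrom, topBarAux, List.any_eq_true, List.mem_range, Bool.and_eq_true,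
    decide_eq_true_eq]
  constructor
  · rintro ⟨j, hj, ⟨⟨_, hbar⟩, hcnt⟩⟩
    exact ⟨j, hj, hbar, by omega⟩
  · rintro ⟨j, hj, hbar, hcnt⟩
    exact ⟨j, hj, ⟨⟨Nat.zero_le j, hbar⟩, by omega⟩⟩

-- ===== VERDICT (by name: the statement is the Claim_ definition above) =====
theorem paranthesis_spec : Claim_equal_paranthesis := by
  intro expr _
  unfold Spec_paranthesis paranthesis paranthesis_alt
  rw [paranthesisLoop_eq, altLoop_eq expr expr.toList expr.toList.length 0 (by omega),
    topBar_zero]
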